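-- pv_equiv track=rewrite | github.com/Christian-Boehme/RWTH_Aachen_HiWi | OxyflameWorkshop/Scripts/ComputeVolumetricAverageData/GenerateMechanismDependentMatlabFiles.py | sort_line
-- ===== SOURCE A (Python) =====
-- def remove_space(string):
--     return "".join(string.split())
--
-- def sort_line(line, production, consumption):
--
--     rrates = remove_space(line)
--     rrates = rrates.replace(')', '')
--     rrates = line.split('W(')
--     for i in range(len(rrates) - 1):
--         rate = 'W(' + rrates[i + 1][:rrates[i + 1].index(')') + len(')')]
--         if '+' in rrates[i]:
--             production.append(
--                 get_production_rate_factor(rrates[i], '+') + rate)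
--         elif '-' in rrates[i]:
--             consumption.append(
--                 get_production_rate_factor(rrates[i], '-') + rate)
--         else:
--             # start
--             production.append(
--                 get_production_rate_factor(rrates[i], ' ') + rate)
--
--     return production, consumption
--
-- def get_production_rate_factor(cdot, symbol):
--
--     fac = cdot.split(symbol)
--     if len(fac) > 1:
--         if '*' in fac[1]:
--             return fac[1][1:]
--     return ''
-- ===== SOURCE B (Python) =====
-- def sort_line(line, production, consumption):
--     # One-pass character-level state machine (no split, no indexed loop):
--     # scan the characters once, buffering text since the last 'W(' marker;
--     # when a marker opens, remember the gap before it; when its ')' arrives,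
--     # classify that gap and emit the entry. Appends in place like A.
--     since = []          # characters seen since the most recent 'W(' (or start)
--     open_gap = None     # gap text preceding the currently open 'W(' token
--     i, n = 0, len(line)
--     while i < n:
--         if line.startswith('W(', i):
--             open_gap = ''.join(since)
--             since = []
--             i += 2
--         else:
--             c = line[i]
--             since.append(c)
--             if c == ')' and open_gap is not None:
--                 _emit(open_gap, 'W(' + ''.join(since), production, consumption)
--                 open_gap = None
--             i += 1
--     return production, consumption
--
-- def _emit(gap, rate, production, consumption):
--     if '+' in gap:
--         production.append(_factor(gap, '+') + rate)
--     elif '-' in gap: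
--         consumption.append(_factor(gap, '-') + rate)
--     else:
--         production.append(_factor(gap, ' ') + rate)
--
-- def _factor(gap, sym):
--     i = gap.find(sym)
--     if i < 0:
--         return ''
--     j = gap.find(sym, i + 1)
--     seg = gap[i + 1:] if j < 0 else gap[i + 1:j]
--     return seg[1:] if '*' in seg else ''
-- ===== Notes on version B (the rewrite author's own statement) =====
-- stated objective: alternative
-- what changed: Replaces A's split('W(')-into-a-list plus indexed range loop (and the split-based factor helper) by a one-pass character-level state machine: scan the line character by character, buffering the text since the last 'W(' marker, remembering the gap when a marker opens and emitting a classified entry when its ')' arrives; the factor is extracted by find/slice instead of split.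
import Mathlib
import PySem

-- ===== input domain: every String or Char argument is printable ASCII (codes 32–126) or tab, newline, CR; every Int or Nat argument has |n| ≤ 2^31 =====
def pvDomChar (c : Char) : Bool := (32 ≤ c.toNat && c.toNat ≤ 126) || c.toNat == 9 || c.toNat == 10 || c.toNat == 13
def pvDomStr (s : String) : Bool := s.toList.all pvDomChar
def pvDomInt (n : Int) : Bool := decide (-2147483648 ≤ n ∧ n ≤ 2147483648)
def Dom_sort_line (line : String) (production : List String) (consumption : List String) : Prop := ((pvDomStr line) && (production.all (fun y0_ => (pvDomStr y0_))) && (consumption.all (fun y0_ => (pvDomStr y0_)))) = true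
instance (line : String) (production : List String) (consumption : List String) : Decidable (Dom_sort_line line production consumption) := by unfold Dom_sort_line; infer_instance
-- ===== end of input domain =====

-- B replaces A's split('W(')-list + indexed range loop by a one-pass character-level state
-- machine (buffer since last 'W(', emit on ')'); same return value. Like A, the equivalence is
-- about the RETURN value only: Python A and B both append to the caller's lists in place
-- (B performs the same mutation).


-- ===== PORT A =====
-- helper remove_space of A (its result is dead in A, kept for faithfulness)
def remove_space (string : String) : String :=
  PySem.Str.join "" (PySem.Str.split₀ string)

-- helper get_production_rate_factor of A: cdot.split(symbol); if len>1 and '*' in fac[1]: fac[1][1:] else ''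
def get_production_rate_factor (cdot : List Char) (symbol : List Char) : List Char :=
  let fac := PySem.Chars.splitOn cdot symbol
  if 1 < fac.length then
    if PySem.Chars.isIn ['*'] (PySem.List.pyGetD fac 1 []) = true then
      PySem.List.slice (PySem.List.pyGetD fac 1 []) (some 1) none
    else []
  else []

-- the body of A's for-loop, for rrates[i] = prev and rrates[i+1] = nxt
-- (rrates[i+1].index(')') raises where ')' is absent: PySem find gives -1 there, the slice [:0]
--  then yields "" — those inputs are excluded by Pre_sort_line)
def stepA (prev : List Char) (nxt : List Char) (acc : List String × List String) : List String × List String :=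
  let rate := ['W', '('] ++ PySem.List.slice nxt none (some (PySem.Chars.find nxt [')'] + 1))
  if PySem.Chars.isIn ['+'] prev = true then
    (acc.1 ++ [String.ofList (get_production_rate_factor prev ['+'] ++ rate)], acc.2)
  else if PySem.Chars.isIn ['-'] prev = true then
    (acc.1, acc.2 ++ [String.ofList (get_production_rate_factor prev ['-'] ++ rate)])
  else
    (acc.1 ++ [String.ofList (get_production_rate_factor prev [' '] ++ rate)], acc.2)

def sort_line (line : String) (production : List String) (consumption : List String) : List String × List String :=
  let rrates0 := remove_space line
  let rrates1 := PySem.Str.replace rrates0 ")" ""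
  let rrates := PySem.Chars.splitOn line.toList ['W', '(']
  let _ := rrates1
  (PySem.List.pyRange 0 ((rrates.length : Int) - 1) 1).foldl
    (fun acc i => stepA (PySem.List.pyGetD rrates i []) (PySem.List.pyGetD rrates (i + 1) []) acc)
    (production, consumption)

-- ===== PORT B =====
-- B's factor helper _factor: first occurrence of sym by find, segment up to the next occurrence by findFrom
def pvFactor (gap : List Char) (sym : Char) : List Char :=
  let i := PySem.Chars.find gap [sym]
  if i < 0 then []
  else
    let j := PySem.Chars.findFrom gap [sym] (i + 1)
    let seg := if j < 0 then PySem.List.slice gap (some (i + 1)) none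
               else PySem.List.slice gap (some (i + 1)) (some j)
    if PySem.Chars.isIn ['*'] seg = true then PySem.List.slice seg (some 1) none else []

-- B's _emit: classify the gap and append the entry
def pvEmit (gap : List Char) (rate : List Char) (prod cons : List String) : List String × List String :=
  if PySem.Chars.isIn ['+'] gap = true then
    (prod ++ [String.ofList (pvFactor gap '+' ++ rate)], cons)
  else if PySem.Chars.isIn ['-'] gap = true then
    (prod, cons ++ [String.ofList (pvFactor gap '-' ++ rate)])
  else
    (prod ++ [String.ofList (pvFactor gap ' ' ++ rate)], cons)

-- B's while-loop: the character-level state machine (since = chars since the last 'W(',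
-- openGap = some g while a 'W(' is open with gap g before it)
def pvMach (s : List Char) (since : List Char) (openGap : Option (List Char))
    (prod cons : List String) : List String × List String :=
  match s with
  | [] => (prod, cons)
  | c :: t =>
    if c = 'W' ∧ t.head? = some '(' then
      pvMach t.tail [] (some since) prod cons
    else
      let since' := since ++ [c]
      if c = ')' ∧ openGap.isSome then
        let out := pvEmit (openGap.getD []) (['W', '('] ++ since') prod cons
        pvMach t since' none out.1 out.2
      else
        pvMach t since' openGap prod cons
termination_by s.length
decreasing_by
  · simp only [List.length_cons, List.length_tail]
    omega
  · simp
  · simp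

def sort_line_alt (line : String) (production : List String) (consumption : List String) : List String × List String :=
  pvMach line.toList [] none production consumption

-- ===== PRECONDITION & SPEC =====
-- Pre_ excludes exactly the inputs on which A raises ValueError: some piece of line after a
-- 'W(' delimiter contains no ')' , so rrates[i+1].index(')') fails. Nothing else is excluded.
def Pre_sort_line (line : String) (production : List String) (consumption : List String) : Prop :=
  ∀ c ∈ (PySem.Chars.splitOn line.toList ['W', '(']).tail, ')' ∈ c

instance (line : String) (production : List String) (consumption : List String) : Decidable (Pre_sort_line line production consumption) := by unfold Pre_sort_line; infer_instance

def pvWitness_sort_line : String × List String × List String :=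
  ("2*W(A) + 3*W(B) - W(C)", ["p0"], [])

def Spec_sort_line (line : String) (production : List String) (consumption : List String) (out : List String × List String) : Prop := out = sort_line_alt line production consumption
instance (line : String) (production : List String) (consumption : List String) (out : List String × List String) : Decidable (Spec_sort_line line production consumption out) := by unfold Spec_sort_line; infer_instance

-- ===== CLAIM (what is proved, stated in full; the proofs are below) =====
def Claim_equal_sort_line : Prop := ∀ (line : String) (production : List String) (consumption : List String), Dom_sort_line line production consumption → Pre_sort_line line production consumption → Spec_sort_line line production consumption (sort_line line production consumption)

-- ===== LEMMAS AND PROOFS =====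

-- proof-side middle man: a consuming find/slice scan; A's fold is reduced to it, and the
-- state machine pvMach is shown to simulate it
def pvScan (s : List Char) (production : List String) (consumption : List String) : List String × List String :=
  let p := PySem.Chars.find s ['W', '(']
  if _h : p < 0 then (production, consumption)
  else
    let gap := PySem.List.slice s none (some p)
    let rest := PySem.List.slice s (some (p + 2)) none
    let rate := ['W', '('] ++ PySem.List.slice rest none (some (PySem.Chars.find rest [')'] + 1))
    if PySem.Chars.isIn ['+'] gap = true then
      pvScan rest (production ++ [String.ofList (pvFactor gap '+' ++ rate)]) consumption
    else if PySem.Chars.isIn ['-'] gap = true then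
      pvScan rest production (consumption ++ [String.ofList (pvFactor gap '-' ++ rate)])
    else
      pvScan rest (production ++ [String.ofList (pvFactor gap ' ' ++ rate)]) consumption
termination_by s.length
decreasing_by
  all_goals
  · have hp : (0 : Int) ≤ PySem.Chars.find s ['W', '('] := by omega
    have hs : (['W', '('] : List Char) <:+: s := (PySem.Chars.find_nonneg_iff s _).mp hp
    have h2 : 2 ≤ s.length := by simpa using hs.length_le
    rw [PySem.List.slice_from _ (by omega : (0:Int) ≤ PySem.Chars.find s ['W', '('] + 2)]
    simp only [List.length_drop]
    omega

-- find.go at offset k is find.go at 0, shifted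
theorem pv_findGo_shift (sub : List Char) (l : List Char) (k : ℕ) :
    PySem.Chars.find.go sub l k =
      if PySem.Chars.find.go sub l 0 = -1 then -1 else PySem.Chars.find.go sub l 0 + k := by
  induction l generalizing k with
  | nil =>
    simp only [PySem.Chars.find.go]
    split <;> simp
  | cons c t ih =>
    simp only [PySem.Chars.find.go]
    by_cases hp : sub.isPrefixOf (c :: t) <;> simp only [hp, if_true, if_false]
    · simp
    · have hm1 : -1 ≤ PySem.Chars.find.go sub t 0 := PySem.Chars.neg_one_le_find t sub
      rw [ih (k + 1), ih 1]
      split_ifs <;> omega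

-- one-step characterisation of find on a cons
theorem pv_find_cons (sub : List Char) (c : Char) (t : List Char) :
    PySem.Chars.find (c :: t) sub =
      if sub.isPrefixOf (c :: t) then 0
      else if PySem.Chars.find t sub = -1 then -1 else PySem.Chars.find t sub + 1 := by
  show PySem.Chars.find.go sub (c :: t) 0 = _
  simp only [PySem.Chars.find.go]
  by_cases hp : sub.isPrefixOf (c :: t) <;> simp only [hp, if_true, if_false]
  · simp
  · rw [pv_findGo_shift sub t 1]
    rfl

-- splitOn.go with enough fuel, in terms of splitOn
theorem pv_splitOnGo (sep : List Char) (hsep : sep ≠ []) (fuel : ℕ) :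
    ∀ (l cur acc : _), l.length + 1 ≤ fuel →
      PySem.Chars.splitOn.go sep fuel l cur acc =
        acc.reverse ++ (PySem.Chars.splitOn l sep).modifyHead (cur.reverse ++ ·) := by
  have hsl : 1 ≤ sep.length := List.length_pos_iff.mpr hsep
  induction fuel using Nat.strong_induction_on with
  | _ fuel ih =>
    intro l cur acc hfuel
    cases fuel with
    | zero => omega
    | succ f =>
      cases l with
      | nil =>
        simp [PySem.Chars.splitOn.go, PySem.Chars.splitOn]
      | cons c t =>
        simp only [List.length_cons] at hfuel
        have hdlen : (List.drop sep.length (c :: t)).length + 1 ≤ t.length + 1 := by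
          rw [List.length_drop]
          simp only [List.length_cons]
          omega
        have hlast : PySem.Chars.splitOn (c :: t) sep =
            if sep.isPrefixOf (c :: t) then
              [] :: PySem.Chars.splitOn ((c :: t).drop sep.length) sep
            else (PySem.Chars.splitOn t sep).modifyHead (c :: ·) := by
          show PySem.Chars.splitOn.go sep (t.length + 1 + 1) (c :: t) [] [] = _
          simp only [PySem.Chars.splitOn.go, List.reverse_nil]
          by_cases hp : sep.isPrefixOf (c :: t) <;> simp only [hp, if_true]
          · rw [ih (t.length + 1) (by omega) ((c :: t).drop sep.length) [] [[]] hdlen]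
            cases PySem.Chars.splitOn ((c :: t).drop sep.length) sep <;> simp
          · simp only [Bool.false_eq_true, if_false]
            rw [ih (t.length + 1) (by omega) t [c] [] (by omega)]
            cases PySem.Chars.splitOn t sep <;> simp
        simp only [PySem.Chars.splitOn.go]
        by_cases hp : sep.isPrefixOf (c :: t) <;> simp only [hp, if_true]
        · rw [ih f (by omega) ((c :: t).drop sep.length) [] (cur.reverse :: acc)
            (by omega)]
          rw [hlast]
          simp only [hp, if_true]
          cases PySem.Chars.splitOn ((c :: t).drop sep.length) sep <;> simp
        · simp only [Bool.false_eq_true, if_false]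
          rw [ih f (by omega) t (c :: cur) acc (by omega)]
          rw [hlast]
          simp only [hp, Bool.false_eq_true, if_false]
          cases PySem.Chars.splitOn t sep <;> simp

-- splitOn on a cons
theorem pv_splitOn_cons (sep : List Char) (hsep : sep ≠ []) (c : Char) (t : List Char) :
    PySem.Chars.splitOn (c :: t) sep =
      if sep.isPrefixOf (c :: t) then
        [] :: PySem.Chars.splitOn ((c :: t).drop sep.length) sep
      else (PySem.Chars.splitOn t sep).modifyHead (c :: ·) := by
  have hsl : 1 ≤ sep.length := List.length_pos_iff.mpr hsep
  have hdlen : (List.drop sep.length (c :: t)).length + 1 ≤ t.length + 1 := by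
    rw [List.length_drop]
    simp only [List.length_cons]
    omega
  show PySem.Chars.splitOn.go sep (t.length + 1 + 1) (c :: t) [] [] = _
  simp only [PySem.Chars.splitOn.go, List.reverse_nil]
  by_cases hp : sep.isPrefixOf (c :: t) <;> simp only [hp, if_true]
  · rw [pv_splitOnGo sep hsep (t.length + 1) ((c :: t).drop sep.length) [] [[]] hdlen]
    cases PySem.Chars.splitOn ((c :: t).drop sep.length) sep <;> simp
  · simp only [Bool.false_eq_true, if_false]
    rw [pv_splitOnGo sep hsep (t.length + 1) t [c] [] (by omega)]
    cases PySem.Chars.splitOn t sep <;> simp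

-- one-step characterisation of splitOn via find
theorem pv_splitOn_step (sep : List Char) (hsep : sep ≠ []) (l : List Char) :
    PySem.Chars.splitOn l sep =
      if PySem.Chars.find l sep < 0 then [l]
      else l.take (PySem.Chars.find l sep).toNat ::
           PySem.Chars.splitOn (l.drop ((PySem.Chars.find l sep).toNat + sep.length)) sep := by
  induction l with
  | nil =>
    have hfind : PySem.Chars.find ([] : List Char) sep = -1 := by
      simp [PySem.Chars.find, PySem.Chars.find.go, List.isEmpty_iff, hsep]
    rw [hfind]
    simp [PySem.Chars.splitOn, PySem.Chars.splitOn.go]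
  | cons c t ih =>
    rw [pv_splitOn_cons sep hsep c t, pv_find_cons sep c t]
    by_cases hp : sep.isPrefixOf (c :: t) <;> simp only [hp, if_true]
    · norm_num
    · simp only [Bool.false_eq_true, if_false]
      have hm1 : -1 ≤ PySem.Chars.find t sep := PySem.Chars.neg_one_le_find t sep
      by_cases hft : PySem.Chars.find t sep = -1
      · rw [ih]
        simp [hft]
      · have hft0 : 0 ≤ PySem.Chars.find t sep := by omega
        simp only [hft, if_false]
        have hnlt : ¬ (PySem.Chars.find t sep + 1 < 0) := by omega
        have hnlt2 : ¬ (PySem.Chars.find t sep < 0) := by omega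
        simp only [hnlt, hnlt2, if_false, if_neg hnlt, if_neg hnlt2]
        have htn : (PySem.Chars.find t sep + 1).toNat = (PySem.Chars.find t sep).toNat + 1 := by
          omega
        rw [ih, if_neg hnlt2, htn]
        rw [show (PySem.Chars.find t sep).toNat + 1 + sep.length
              = ((PySem.Chars.find t sep).toNat + sep.length) + 1 from by omega]
        simp [List.take_succ_cons, List.drop_succ_cons]

theorem pv_splitOn_ne_nil (sep : List Char) (hsep : sep ≠ []) (l : List Char) :
    PySem.Chars.splitOn l sep ≠ [] := by
  rw [pv_splitOn_step sep hsep l]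
  split <;> simp

-- A's loop as a recursion on adjacent pairs of the chunk list
def pvPairFold (chunks : List (List Char)) (acc : List String × List String) : List String × List String :=
  match chunks with
  | a :: b :: t => pvPairFold (b :: t) (stepA a b acc)
  | _ => acc

-- the indexed pyRange fold over a chunk list is the pair recursion on its drop
theorem pv_foldIdx (full : List (List Char)) (k : ℕ) (acc : List String × List String) :
    (PySem.List.pyRange k ((full.length : Int) - 1) 1).foldl
      (fun acc i => stepA (PySem.List.pyGetD full i []) (PySem.List.pyGetD full (i + 1) []) acc) acc
    = pvPairFold (full.drop k) acc := by
  suffices H : ∀ (n k : ℕ) (acc : List String × List String), full.length - k = n →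
      (PySem.List.pyRange (k : Int) ((full.length : Int) - 1) 1).foldl
        (fun acc i => stepA (PySem.List.pyGetD full i []) (PySem.List.pyGetD full (i + 1) []) acc) acc
      = pvPairFold (full.drop k) acc by
    exact H (full.length - k) k acc rfl
  intro n
  induction n with
  | zero =>
    intro k acc hn
    have hk : full.length ≤ k := by omega
    rw [PySem.List.pyRange_one_eq_nil (by push_cast; omega)]
    rw [List.drop_eq_nil_iff.mpr hk]
    rfl
  | succ n ihn =>
    intro k acc hn
    by_cases hlt : k + 1 < full.length
    · have hklen : k < full.length := by omega
      have hk1len : k + 1 < full.length := hlt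
      rw [PySem.List.pyRange_one_cons (by push_cast; omega)]
      rw [List.foldl_cons]
      have hdk : full.drop k = full[k] :: full.drop (k + 1) :=
        List.drop_eq_getElem_cons hklen
      have hdk1 : full.drop (k + 1) = full[k + 1] :: full.drop (k + 2) :=
        List.drop_eq_getElem_cons hk1len
      have hg1 : PySem.List.pyGetD full (k : Int) [] = full[k] := by
        rw [PySem.List.pyGetD_natCast]
        exact List.getD_eq_getElem full [] hklen
      have hg2 : PySem.List.pyGetD full ((k : Int) + 1) [] = full[k + 1] := by
        rw [show ((k : Int) + 1) = ((k + 1 : ℕ) : Int) from by push_cast; ring,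
          PySem.List.pyGetD_natCast]
        exact List.getD_eq_getElem full [] hk1len
      rw [hg1, hg2]
      rw [show ((k : Int) + 1) = ((k + 1 : ℕ) : Int) from by push_cast; ring]
      rw [ihn (k + 1) _ (by omega)]
      rw [hdk, hdk1]
      rfl
    · have hr : ((full.length : Int) - 1) ≤ (k : Int) := by push_cast; omega
      rw [PySem.List.pyRange_one_eq_nil hr]
      have hlen : (full.drop k).length ≤ 1 := by
        rw [List.length_drop]; omega
      simp only [List.foldl_nil]
      cases hdd : full.drop k with
      | nil => rfl
      | cons a l2 =>
        cases l2 with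
        | nil => rfl
        | cons b l3 =>
          rw [hdd] at hlen
          simp at hlen

-- find of a single char in a take, when the char occurs in the take
theorem pv_mem_singleton_infix (c : Char) (l : List Char) (h : c ∈ l) : [c] <:+: l := by
  obtain ⟨s, t, rfl⟩ := List.append_of_mem h
  exact ⟨s, t, by simp⟩

theorem pv_find_take (c : Char) (l : List Char) (m : ℕ) (h : c ∈ l.take m) :
    PySem.Chars.find (l.take m) [c] = PySem.Chars.find l [c] := by
  induction l generalizing m with
  | nil => simp at h
  | cons x t ih =>
    cases m with
    | zero => simp at h
    | succ m =>
      simp only [List.take_succ_cons] at h ⊢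
      rw [pv_find_cons [c] x (t.take m), pv_find_cons [c] x t]
      have hpref : ([c].isPrefixOf (x :: t.take m)) = (c == x) := by
        simp [List.isPrefixOf]
      have hpref2 : ([c].isPrefixOf (x :: t)) = (c == x) := by
        simp [List.isPrefixOf]
      rw [hpref, hpref2]
      by_cases hcx : c = x
      · simp [hcx]
      · have hmem : c ∈ t.take m := by
          rcases List.mem_cons.mp h with h' | h'
          · exact absurd h' hcx
          · exact h'
        rw [ih m hmem]

theorem pv_find_lt_of_mem (c : Char) (l : List Char) (h : c ∈ l) :
    0 ≤ PySem.Chars.find l [c] ∧ (PySem.Chars.find l [c]).toNat < l.length := by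
  have h0 : 0 ≤ PySem.Chars.find l [c] :=
    (PySem.Chars.find_nonneg_iff l [c]).mpr (pv_mem_singleton_infix c l h)
  refine ⟨h0, ?_⟩
  have hsp := (PySem.Chars.find_spec h0).1
  have : l.drop (PySem.Chars.find l [c]).toNat ≠ [] := by
    intro hnil; rw [hnil] at hsp; exact absurd hsp.length_le (by simp)
  have hle := List.drop_eq_nil_iff.not.mp this
  omega

-- A's factor helper equals B's
theorem pv_fac_eq (gap : List Char) (sym : Char) :
    get_production_rate_factor gap [sym] = pvFactor gap sym := by
  have hone : ([sym] : List Char) ≠ [] := by simp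
  have hlensym : ([sym] : List Char).length = 1 := rfl
  simp only [get_production_rate_factor, pvFactor]
  by_cases hi : PySem.Chars.find gap [sym] < 0
  · rw [if_pos hi, pv_splitOn_step [sym] hone gap, if_pos hi]
    simp
  · have hi0 : 0 ≤ PySem.Chars.find gap [sym] := by omega
    have hmem : sym ∈ gap := by
      have := (PySem.Chars.find_nonneg_iff gap [sym]).mp hi0
      exact this.subset (by simp)
    have hlt := (pv_find_lt_of_mem sym gap hmem).2
    set i := PySem.Chars.find gap [sym] with hidef
    have hcast : (i + 1 : Int) = ((i.toNat + 1 : ℕ) : Int) := by omega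
    have hkle : i.toNat + 1 ≤ gap.length := by omega
    rw [if_neg hi, hcast, PySem.Chars.findFrom_natCast gap [sym] (i.toNat + 1) hkle]
    rw [pv_splitOn_step [sym] hone gap, if_neg hi]
    simp only [hlensym]
    set r2 := gap.drop (i.toNat + 1) with hr2
    obtain ⟨a2, t2, hsp2⟩ : ∃ a t, PySem.Chars.splitOn r2 [sym] = a :: t := by
      cases hq : PySem.Chars.splitOn r2 [sym] with
      | nil => exact absurd hq (pv_splitOn_ne_nil [sym] hone r2)
      | cons a l2 => exact ⟨a, l2, rfl⟩
    rw [hsp2]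
    rw [if_pos (by simp : 1 < (gap.take i.toNat :: a2 :: t2).length)]
    have hgd : PySem.List.pyGetD (gap.take i.toNat :: a2 :: t2) 1 [] = a2 := by
      rw [show (1 : Int) = ((1 : ℕ) : Int) from by norm_num, PySem.List.pyGetD_natCast]
      rfl
    rw [hgd]
    by_cases hf2 : PySem.Chars.find r2 [sym] = -1
    · have ha2 : a2 = r2 := by
        rw [pv_splitOn_step [sym] hone r2, if_pos (by omega)] at hsp2
        exact (List.cons_eq_cons.mp hsp2).1.symm
      rw [if_pos hf2, if_pos (show (-1 : Int) < 0 by norm_num)]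
      rw [PySem.List.slice_from gap (by omega : (0:Int) ≤ ((i.toNat + 1 : ℕ) : Int))]
      rw [show (((i.toNat + 1 : ℕ) : Int)).toNat = i.toNat + 1 from by omega]
      rw [ha2, hr2]
    · have hf2m1 := PySem.Chars.neg_one_le_find r2 [sym]
      have hf20 : 0 ≤ PySem.Chars.find r2 [sym] := by omega
      have ha2 : a2 = r2.take (PySem.Chars.find r2 [sym]).toNat := by
        rw [pv_splitOn_step [sym] hone r2, if_neg (by omega)] at hsp2
        exact (List.cons_eq_cons.mp hsp2).1.symm
      rw [if_neg hf2, if_neg (by omega : ¬ ((i.toNat + 1 : ℕ) : Int) + PySem.Chars.find r2 [sym] < 0)]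
      rw [PySem.List.slice_toNat gap (by omega : (0:Int) ≤ ((i.toNat + 1 : ℕ) : Int))
        (by omega : (0:Int) ≤ ((i.toNat + 1 : ℕ) : Int) + PySem.Chars.find r2 [sym])]
      rw [show (((i.toNat + 1 : ℕ) : Int) + PySem.Chars.find r2 [sym]).toNat
            - (((i.toNat + 1 : ℕ) : Int)).toNat = (PySem.Chars.find r2 [sym]).toNat from by omega]
      rw [show (((i.toNat + 1 : ℕ) : Int)).toNat = i.toNat + 1 from by omega]
      rw [ha2, hr2]

-- A's pair recursion over splitOn equals the consuming scan
theorem pv_main (s : List Char) (prod cons : List String)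
    (hpre : ∀ c ∈ (PySem.Chars.splitOn s ['W', '(']).tail, ')' ∈ c) :
    pvPairFold (PySem.Chars.splitOn s ['W', '(']) (prod, cons) = pvScan s prod cons := by
  have hsep : (['W', '('] : List Char) ≠ [] := by simp
  suffices H : ∀ (n : ℕ) (s : List Char) (prod cons : List String), s.length ≤ n →
      (∀ c ∈ (PySem.Chars.splitOn s ['W', '(']).tail, ')' ∈ c) →
      pvPairFold (PySem.Chars.splitOn s ['W', '(']) (prod, cons) = pvScan s prod cons by
    exact H s.length s prod cons le_rfl hpre
  intro n
  induction n with
  | zero =>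
    intro s prod cons hlen _hpre
    have hs : s = [] := List.length_eq_zero_iff.mp (by omega)
    subst hs
    rw [pv_splitOn_step _ hsep []]
    rw [pvScan]
    simp [PySem.Chars.find, PySem.Chars.find.go, pvPairFold]
  | succ n ihn =>
    intro s prod cons hlen hpre
    rw [pvScan]
    by_cases hf : PySem.Chars.find s ['W', '('] < 0
    · rw [dif_pos hf]
      rw [pv_splitOn_step _ hsep s, if_pos hf]
      rfl
    · rw [dif_neg hf]
      have hf0 : 0 ≤ PySem.Chars.find s ['W', '('] := by omega
      set f := PySem.Chars.find s ['W', '('] with hfdef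
      have hinf : (['W', '('] : List Char) <:+: s := (PySem.Chars.find_nonneg_iff s _).mp hf0
      have hslen : 2 ≤ s.length := by simpa using hinf.length_le
      have hgap : PySem.List.slice s none (some f) = s.take f.toNat :=
        PySem.List.slice_to s hf0
      have hrest : PySem.List.slice s (some (f + 2)) none = s.drop (f.toNat + 2) := by
        rw [PySem.List.slice_from s (by omega : (0:Int) ≤ f + 2)]
        congr 1
        omega
      rw [hgap, hrest]
      rw [pv_splitOn_step _ hsep s, if_neg hf]
      set rest := s.drop (f.toNat + [('W' : Char), '('].length) with hrestdef
      have hrr : rest = s.drop (f.toNat + 2) := by rw [hrestdef]; norm_num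
      rw [← hrr]
      obtain ⟨nxt, tl, hsp⟩ : ∃ nxt tl, PySem.Chars.splitOn rest ['W', '('] = nxt :: tl := by
        cases hq : PySem.Chars.splitOn rest ['W', '('] with
        | nil => exact absurd hq (pv_splitOn_ne_nil _ hsep rest)
        | cons a l2 => exact ⟨a, l2, rfl⟩
      have htail : (PySem.Chars.splitOn s ['W', '(']).tail =
          PySem.Chars.splitOn rest ['W', '('] := by
        rw [pv_splitOn_step _ hsep s, if_neg (by rw [← hfdef]; exact hf)]
        rw [List.tail_cons, hrestdef, hfdef]
      have hnxt : ')' ∈ nxt := by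
        apply hpre
        rw [htail, hsp]
        simp
      have hpre' : ∀ c ∈ (PySem.Chars.splitOn rest ['W', '(']).tail, ')' ∈ c := by
        intro c hc
        apply hpre
        rw [htail]
        exact List.mem_of_mem_tail hc
      have hrlen : rest.length ≤ n := by
        rw [hrr, List.length_drop]
        omega
      have hrate : PySem.List.slice nxt none (some (PySem.Chars.find nxt [')'] + 1)) =
          PySem.List.slice rest none (some (PySem.Chars.find rest [')'] + 1)) := by
        rcases (by rw [pv_splitOn_step _ hsep rest] at hsp
                   split at hsp
                   · exact Or.inl (List.cons_eq_cons.mp hsp).1.symm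
                   · exact Or.inr ⟨_, (List.cons_eq_cons.mp hsp).1.symm⟩ :
            nxt = rest ∨ ∃ m : ℕ, nxt = rest.take m) with heq | ⟨m, heq⟩
        · rw [heq]
        · have hfeq : PySem.Chars.find nxt [')'] = PySem.Chars.find rest [')'] := by
            rw [heq] at hnxt ⊢
            exact pv_find_take ')' rest m hnxt
          have hk := pv_find_lt_of_mem ')' nxt hnxt
          rw [hfeq] at hk
          rw [hfeq]
          set k := PySem.Chars.find rest [')'] with hkdef
          rw [PySem.List.slice_to nxt (by omega : (0:Int) ≤ k + 1),
              PySem.List.slice_to rest (by omega : (0:Int) ≤ k + 1)]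
          rw [heq, List.take_take]
          congr 1
          have hnl : nxt.length ≤ m := by rw [heq]; simp
          have : (k + 1).toNat ≤ m := by
            have := hk.2
            rw [heq] at this
            simp only [List.length_take] at this
            omega
          omega
      rw [hsp]
      show pvPairFold (nxt :: tl) (stepA (s.take f.toNat) nxt (prod, cons)) = _
      rw [← hsp]
      rw [ihn rest (stepA (s.take f.toNat) nxt (prod, cons)).1
            (stepA (s.take f.toNat) nxt (prod, cons)).2 hrlen hpre']
      simp only [stepA, pv_fac_eq, hrate]
      split_ifs <;> rfl

-- a 1-element take cannot contain the 2-character marker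
theorem pv_no_infix_take1 (l : List Char) : ¬ (['W', '('] : List Char) <:+: l.take 1 := by
  intro h
  have := h.length_le
  simp at this

-- a marker occurrence in l ++ [a] is in l, or ends exactly at a
theorem pv_infix_snoc (l : List Char) (a : Char) (h : (['W', '('] : List Char) <:+: (l ++ [a])) :
    (['W', '('] : List Char) <:+: l ∨ (a = '(' ∧ l.getLast? = some 'W') := by
  induction l with
  | nil =>
    exfalso
    have := h.length_le
    simp at this
  | cons x l' ih =>
    rw [List.cons_append] at h
    rcases List.infix_cons_iff.mp h with hpre | hinf
    · cases l' with
      | nil =>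
        have h1 : x = 'W' ∧ a = '(' := by
          rcases hpre with ⟨r, hr⟩
          simp at hr
          exact ⟨hr.1.symm, hr.2.1.symm⟩
        exact Or.inr ⟨h1.2, by rw [h1.1]; rfl⟩
      | cons y l'' =>
        have h1 : x = 'W' ∧ y = '(' := by
          rcases hpre with ⟨r, hr⟩
          simp at hr
          exact ⟨hr.1.symm, hr.2.1.symm⟩
        refine Or.inl ⟨[], l'', ?_⟩
        simp [h1.1, h1.2]
    · rcases ih hinf with h1 | ⟨h1, h2⟩
      · exact Or.inl (List.infix_cons h1)
      · refine Or.inr ⟨h1, ?_⟩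
        simp [List.getLast?_cons, h2]

-- first marker occurrence in g ++ 'W' :: '(' :: r is at g.length, given none inside g ++ ['W']
theorem pv_find_marker (g : List Char) (r : List Char)
    (h : ¬ (['W', '('] : List Char) <:+: (g ++ ['W'])) :
    PySem.Chars.find (g ++ 'W' :: '(' :: r) ['W', '('] = (g.length : Int) := by
  induction g with
  | nil =>
    rw [List.nil_append, pv_find_cons]
    simp [List.isPrefixOf]
  | cons x g' ih =>
    have h' : ¬ (['W', '('] : List Char) <:+: (g' ++ ['W']) := by
      intro hh
      exact h (List.infix_cons hh)
    rw [List.cons_append, pv_find_cons]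
    have hnp : (['W', '('] : List Char).isPrefixOf (x :: (g' ++ 'W' :: '(' :: r)) = false := by
      rw [Bool.eq_false_iff]
      intro hT
      rcases List.isPrefixOf_iff_prefix.mp hT with ⟨rest, hrest⟩
      simp only [List.cons_append, List.cons.injEq] at hrest
      obtain ⟨hxw, hrest2⟩ := hrest
      cases g' with
      | nil => simp at hrest2
      | cons y g'' =>
        simp only [List.cons_append, List.cons.injEq] at hrest2
        refine h ⟨[], g'' ++ ['W'], ?_⟩
        rw [← hxw, ← hrest2.1]
        simp
    rw [hnp]
    simp only [Bool.false_eq_true, if_false]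
    rw [ih h']
    have hne : ((g'.length : Int)) ≠ -1 := by omega
    simp only [hne, if_false, List.length_cons]
    omega

-- first ')' in buf ++ ')' :: t is at buf.length when ')' ∉ buf
theorem pv_find_rparen (buf : List Char) (t : List Char) (h : ')' ∉ buf) :
    PySem.Chars.find (buf ++ ')' :: t) [')'] = (buf.length : Int) := by
  induction buf with
  | nil =>
    rw [List.nil_append, pv_find_cons]
    simp [List.isPrefixOf]
  | cons x b' ih =>
    have hx : x ≠ ')' := by intro hh; exact h (by simp [hh])
    have h' : ')' ∉ b' := by intro hh; exact h (by simp [hh])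
    rw [List.cons_append, pv_find_cons]
    have hnp : ([')'] : List Char).isPrefixOf (x :: (b' ++ ')' :: t)) = false := by
      rw [Bool.eq_false_iff]
      intro hT
      rcases List.isPrefixOf_iff_prefix.mp hT with ⟨rest, hrest⟩
      simp only [List.cons_append, List.cons.injEq] at hrest
      exact hx hrest.1.symm
    rw [hnp]
    simp only [Bool.false_eq_true, if_false]
    rw [ih h']
    have hne : ((b'.length : Int)) ≠ -1 := by omega
    simp only [hne, if_false, List.length_cons]
    omega

-- PENDING: with an open 'W(' and no ')' seen yet, the machine ends up emitting the entry
-- built from the first ')' of the remaining text, provided every chunk still owns a ')'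
theorem pv_pending (s : List Char) : ∀ (buf : List Char) (g0 : List Char) (prod cons : List String),
    ')' ∉ buf →
    ¬ (['W', '('] : List Char) <:+: (buf ++ s.take 1) →
    (∀ ch ∈ PySem.Chars.splitOn (buf ++ s) ['W', '('], ')' ∈ ch) →
    pvMach s buf (some g0) prod cons =
      (let rate := ['W', '('] ++ (buf ++ s).take ((PySem.Chars.find (buf ++ s) [')'] + 1).toNat)
       let out := pvEmit g0 rate prod cons
       pvMach s buf none out.1 out.2) := by
  have hsep : (['W', '('] : List Char) ≠ [] := by simp
  induction s with
  | nil =>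
    intro buf g0 prod cons hnp hnt hq
    exfalso
    have hfind : PySem.Chars.find (buf ++ []) ['W', '('] < 0 := by
      by_contra hcon
      have h0 : 0 ≤ PySem.Chars.find (buf ++ []) ['W', '('] := by omega
      have := (PySem.Chars.find_nonneg_iff _ _).mp h0
      rw [List.append_nil] at this
      exact hnt (by simpa using this)
    have hc := hq (buf ++ []) (by rw [pv_splitOn_step _ hsep, if_pos hfind]; simp)
    rw [List.append_nil] at hc
    exact hnp hc
  | cons c t ih =>
    intro buf g0 prod cons hnp hnt hq
    by_cases htrig : c = 'W' ∧ t.head? = some '('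
    · exfalso
      obtain ⟨hcw, hth⟩ := htrig
      obtain ⟨r, hr⟩ : ∃ r, t = '(' :: r := by
        cases t with
        | nil => simp at hth
        | cons y t' =>
          have hy : y = '(' := by simpa using hth
          exact ⟨t', by rw [hy]⟩
      subst hcw
      have ht1 : (('W' :: t).take 1 : List Char) = ['W'] := by simp
      rw [ht1] at hnt
      have hfm := pv_find_marker buf r (by simpa [hr] using hnt)
      have hhead : buf ∈ PySem.Chars.splitOn (buf ++ 'W' :: t) ['W', '('] := by
        rw [hr, pv_splitOn_step _ hsep]
        rw [hfm]
        have hgl : ¬ ((buf.length : Int) < 0) := by omega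
        rw [if_neg hgl]
        have : (buf ++ 'W' :: '(' :: r).take ((buf.length : Int)).toNat = buf := by
          simp
        rw [this]
        simp
      have := hq buf (by rw [hr] at hhead ⊢; exact hhead)
      exact hnp this
    · rw [pvMach]
      simp only [htrig, if_false]
      by_cases hrp : c = ')'
      · subst hrp
        have hfr := pv_find_rparen buf t hnp
        have hcond : (')' : Char) = ')' ∧ (some g0).isSome = true := ⟨rfl, rfl⟩
        rw [if_pos hcond]
        have htake : (buf ++ ')' :: t).take ((PySem.Chars.find (buf ++ ')' :: t) [')'] + 1).toNat)
            = buf ++ [')'] := by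
          rw [hfr]
          have : (((buf.length : Int)) + 1).toNat = buf.length + 1 := by omega
          rw [this]
          rw [List.take_append]
          simp
        conv_rhs =>
          rw [pvMach]
        simp only [htrig, if_false]
        rw [htake]
        simp only [Option.isSome_none, Bool.false_eq_true, and_false, if_false]
        rfl
      · have hstep : ∀ (p q : List String), pvMach (c :: t) buf none p q = pvMach t (buf ++ [c]) none p q := by
          intro p q
          rw [pvMach]
          simp only [htrig, if_false]
          simp [hrp]
        simp only [Option.isSome_some]
        rw [if_neg (by simp [hrp])]
        have hnt' : ¬ (['W', '('] : List Char) <:+: ((buf ++ [c]) ++ t.take 1) := by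
          cases t with
          | nil =>
            simpa using hnt
          | cons d t' =>
            intro hh
            have ht1 : ((d :: t').take 1 : List Char) = [d] := by simp
            rw [ht1] at hh
            rcases pv_infix_snoc (buf ++ [c]) d hh with h1 | ⟨h1, h2⟩
            · exact hnt (by simpa using h1)
            · rw [List.getLast?_concat] at h2
              have hcw : c = 'W' := by simpa using h2
              exact htrig ⟨hcw, by simpa using congrArg some h1⟩
        have heq : buf ++ c :: t = (buf ++ [c]) ++ t := by simp
        have hq' : ∀ ch ∈ PySem.Chars.splitOn ((buf ++ [c]) ++ t) ['W', '('], ')' ∈ ch := by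
          rw [← heq]; exact hq
        have := ih (buf ++ [c]) g0 prod cons (by simp [hnp, Ne.symm hrp, hrp]) hnt' hq'
        rw [this]
        simp only [heq]
        rw [hstep _ _]

-- IDLE: the machine with accumulated gap g equals the consuming scan of g ++ s
theorem pv_idle : ∀ (n : ℕ) (s : List Char), s.length ≤ n → ∀ (g : List Char) (prod cons : List String),
    ¬ (['W', '('] : List Char) <:+: (g ++ s.take 1) →
    (∀ ch ∈ (PySem.Chars.splitOn s ['W', '(']).tail, ')' ∈ ch) →
    pvMach s g none prod cons = pvScan (g ++ s) prod cons := by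
  have hsep : (['W', '('] : List Char) ≠ [] := by simp
  intro n
  induction n with
  | zero =>
    intro s hlen g prod cons hnt _hp
    have hs : s = [] := List.length_eq_zero_iff.mp (by omega)
    subst hs
    rw [pvMach, pvScan]
    have hfind : PySem.Chars.find (g ++ []) ['W', '('] < 0 := by
      by_contra hcon
      have h0 : 0 ≤ PySem.Chars.find (g ++ []) ['W', '('] := by omega
      have := (PySem.Chars.find_nonneg_iff _ _).mp h0
      rw [List.append_nil] at this
      exact hnt (by simpa using this)
    rw [dif_pos hfind]
  | succ n ihn =>
    intro s hlen g prod cons hnt hp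
    cases s with
    | nil =>
      rw [pvMach, pvScan]
      have hfind : PySem.Chars.find (g ++ []) ['W', '('] < 0 := by
        by_contra hcon
        have h0 : 0 ≤ PySem.Chars.find (g ++ []) ['W', '('] := by omega
        have := (PySem.Chars.find_nonneg_iff _ _).mp h0
        rw [List.append_nil] at this
        exact hnt (by simpa using this)
      rw [dif_pos hfind]
    | cons c t =>
      by_cases htrig : c = 'W' ∧ t.head? = some '('
      · obtain ⟨hcw, hth⟩ := htrig
        obtain ⟨r, hr⟩ : ∃ r, t = '(' :: r := by
          cases t with
          | nil => simp at hth
          | cons y t' =>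
            have hy : y = '(' := by simpa using hth
            exact ⟨t', by rw [hy]⟩
        subst hcw hr
        have hnt1 : ¬ (['W', '('] : List Char) <:+: (g ++ ['W']) := by
          simpa using hnt
        -- machine side: step into pending, then pv_pending, then IH
        rw [pvMach]
        rw [if_pos ⟨rfl, rfl⟩]
        simp only [List.tail_cons]
        have hqr : ∀ ch ∈ PySem.Chars.splitOn r ['W', '('], ')' ∈ ch := by
          have hsplit : PySem.Chars.splitOn ('W' :: '(' :: r) ['W', '('] =
              [] :: PySem.Chars.splitOn r ['W', '('] := by
            rw [pv_splitOn_cons _ hsep]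
            rw [if_pos (by simp [List.isPrefixOf])]
            simp
          intro ch hch
          apply hp
          rw [hsplit]
          simpa using hch
        have hpend := pv_pending r [] g prod cons (by simp) (by simpa using pv_no_infix_take1 r)
          (by simpa using hqr)
        rw [hpend]
        simp only [List.nil_append]
        set rate := (['W', '('] : List Char) ++ r.take ((PySem.Chars.find r [')'] + 1).toNat) with hrdef
        set out := pvEmit g rate prod cons with houtdef
        have hihr := ihn r (by simp at hlen; omega) [] out.1 out.2
          (by simpa using pv_no_infix_take1 r)
          (by intro ch hch; exact hqr ch (List.mem_of_mem_tail hch))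
        rw [List.nil_append] at hihr
        rw [hihr]
        -- scan side
        conv_rhs => rw [pvScan]
        have hfm := pv_find_marker g r hnt1
        have hgl : ¬ ((g.length : Int) < 0) := by omega
        rw [dif_neg (by rw [hfm]; exact hgl)]
        have hgap : PySem.List.slice (g ++ 'W' :: '(' :: r) none
            (some (PySem.Chars.find (g ++ 'W' :: '(' :: r) ['W', '('])) = g := by
          rw [hfm, PySem.List.slice_to _ (by omega)]
          simp
        have hrest : PySem.List.slice (g ++ 'W' :: '(' :: r)
            (some (PySem.Chars.find (g ++ 'W' :: '(' :: r) ['W', '('] + 2)) none = r := by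
          rw [hfm, PySem.List.slice_from _ (by omega)]
          have : (((g.length : Int)) + 2).toNat = g.length + 2 := by omega
          rw [this]
          rw [List.drop_append]
          rw [List.drop_eq_nil_iff.mpr (by omega)]
          simp [show g.length + 2 - g.length = 2 from by omega]
        rw [hgap, hrest]
        have hrate : (['W', '('] : List Char) ++
            PySem.List.slice r none (some (PySem.Chars.find r [')'] + 1)) = rate := by
          rw [hrdef]
          congr 1
          exact PySem.List.slice_to r (by have := PySem.Chars.neg_one_le_find r [')']; omega)
        simp only [hrate, houtdef, pvEmit]
        split_ifs <;> rfl
      · -- generic character: both sides absorb c into the gap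
        rw [pvMach]
        rw [if_neg htrig]
        simp only [Option.isSome_none, Bool.false_eq_true, and_false, if_false]
        have hnt' : ¬ (['W', '('] : List Char) <:+: ((g ++ [c]) ++ t.take 1) := by
          cases t with
          | nil => simpa using hnt
          | cons d t' =>
            intro hh
            have ht1 : ((d :: t').take 1 : List Char) = [d] := by simp
            rw [ht1] at hh
            rcases pv_infix_snoc (g ++ [c]) d hh with h1 | ⟨h1, h2⟩
            · exact hnt (by simpa using h1)
            · rw [List.getLast?_concat] at h2
              have hcw : c = 'W' := by simpa using h2
              exact htrig ⟨hcw, by simpa using congrArg some h1⟩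
        have hnpref : (['W', '('] : List Char).isPrefixOf (c :: t) = false := by
          by_contra hcon
          have hpt : (['W', '('] : List Char).isPrefixOf (c :: t) = true := by
            revert hcon; cases (['W', '('] : List Char).isPrefixOf (c :: t) <;> simp
          apply htrig
          cases t with
          | nil => simp [List.isPrefixOf] at hpt
          | cons y t' =>
            simp [List.isPrefixOf] at hpt
            exact ⟨hpt.1.symm, by simp [hpt.2.symm]⟩
        have hp' : ∀ ch ∈ (PySem.Chars.splitOn t ['W', '(']).tail, ')' ∈ ch := by
          have hsplit : PySem.Chars.splitOn (c :: t) ['W', '('] =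
              (PySem.Chars.splitOn t ['W', '(']).modifyHead (c :: ·) := by
            rw [pv_splitOn_cons _ hsep]
            rw [hnpref]
            simp
          intro ch hch
          apply hp
          rw [hsplit]
          obtain ⟨h0, tl0, hsp0⟩ : ∃ a l, PySem.Chars.splitOn t ['W', '('] = a :: l := by
            cases hq : PySem.Chars.splitOn t ['W', '('] with
            | nil => exact absurd hq (pv_splitOn_ne_nil _ hsep t)
            | cons a l => exact ⟨a, l, rfl⟩
          rw [hsp0] at hch ⊢
          simpa using hch
        have := ihn t (by simp at hlen; omega) (g ++ [c]) prod cons hnt' hp'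
        rw [this]
        congr 1
        simp

-- ===== VERDICT (by name: the statement is the Claim_ definition above) =====
theorem sort_line_spec : Claim_equal_sort_line := by
  intro line production consumption _hdom hpre
  unfold Spec_sort_line sort_line sort_line_alt
  dsimp only
  have hf := pv_foldIdx (PySem.Chars.splitOn line.toList ['W', '(']) 0 (production, consumption)
  simp only [Nat.cast_zero, List.drop_zero] at hf
  rw [hf]
  rw [pv_main line.toList production consumption hpre]
  have := pv_idle line.toList.length line.toList le_rfl [] production consumption
    (by simpa using pv_no_infix_take1 line.toList) hpre
  rw [List.nil_append] at this
  rw [this]
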